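-- pv_equiv track=rewrite | github.com/denakifev/vqa-gnn-impl | scripts/validate_gqa_ner_data.py | _validate_bio_tags
-- ===== SOURCE A (Python) =====
-- EXPECTED_LABELS = {
--     "O",
--     "B-OBJECT",
--     "I-OBJECT",
--     "B-ATTRIBUTE",
--     "I-ATTRIBUTE",
--     "B-RELATION",
--     "I-RELATION",
-- }
--
-- def _validate_bio_tags(tags: list[str]) -> bool:
--     for idx, tag in enumerate(tags):
--         if tag not in EXPECTED_LABELS:
--             return False
--         if tag.startswith("I-"):
--             label = tag[2:]
--             if idx == 0:
--                 return False
--             prev = tags[idx - 1]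
--             if prev not in {f"B-{label}", f"I-{label}"}:
--                 return False
--     return True
-- ===== SOURCE B (Python) =====
-- # Table-driven finite automaton: precomputed transition table from each state
-- # (start "^" or the previous tag) to the set of tags allowed next; the scan is
-- # pure table lookups, no string parsing at run time.
-- _BASE = ("O", "B-OBJECT", "B-ATTRIBUTE", "B-RELATION")
-- _NEXT = {"^": frozenset(_BASE), "O": frozenset(_BASE)}
-- for _l in ("OBJECT", "ATTRIBUTE", "RELATION"):
--     _allowed = frozenset(_BASE + ("I-" + _l,))
--     _NEXT["B-" + _l] = _allowed
--     _NEXT["I-" + _l] = _allowed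
--
-- def _validate_bio_tags(tags: list[str]) -> bool:
--     state = "^"
--     for tag in tags:
--         if tag not in _NEXT[state]:
--             return False
--         state = tag
--     return True
-- ===== Notes on version B (the rewrite author's own statement) =====
-- stated objective: alternative
-- what changed: Replaces A's per-tag string parsing (membership test, startswith('I-'), slicing tag[2:] and an index-based look-back tags[idx-1]) by a table-driven finite automaton: a transition dict precomputed at module load maps each state (start or previous tag) to the frozenset of tags allowed next, so the scan is pure table/set lookups with no run-time string analysis.
import Mathlib
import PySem

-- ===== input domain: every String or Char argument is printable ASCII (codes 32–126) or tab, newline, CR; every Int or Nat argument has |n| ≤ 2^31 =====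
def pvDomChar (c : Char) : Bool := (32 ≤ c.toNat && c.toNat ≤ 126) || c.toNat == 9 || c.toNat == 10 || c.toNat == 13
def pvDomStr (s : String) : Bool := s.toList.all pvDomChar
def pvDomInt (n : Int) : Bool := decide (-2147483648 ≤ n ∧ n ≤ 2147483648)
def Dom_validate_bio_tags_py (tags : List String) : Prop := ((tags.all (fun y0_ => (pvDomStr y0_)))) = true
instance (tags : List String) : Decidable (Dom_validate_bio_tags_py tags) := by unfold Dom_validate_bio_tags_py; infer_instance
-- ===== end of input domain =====

-- B replaces A's per-tag string parsing with look-back by a table-driven finite automaton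
-- (a precomputed transition dict from each state to the set of tags allowed next); objective: alternative, same cost.

-- ===== PORT A =====
-- module-level constant EXPECTED_LABELS of A's module
def pvEXPECTED : PySem.Set String :=
  PySem.Set.ofList ["O", "B-OBJECT", "I-OBJECT", "B-ATTRIBUTE", "I-ATTRIBUTE", "B-RELATION", "I-RELATION"]

-- the for-idx,tag-in-enumerate loop with early returns; prev = tags[idx-1] via pyGet?
-- (the none branch of pyGet? is unreachable: it is taken only when idx ≥ 1, so idx-1 is in range)
def validate_bio_tags_py_go (tags : List String) (idx : Nat) : List String → Bool
  | [] => true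
  | tag :: rest =>
    if !(PySem.Set.contains pvEXPECTED tag) then false
    else if PySem.Str.startswith tag "I-" then
      let label := PySem.Str.slice tag (some 2) none
      if idx == 0 then false
      else
        match PySem.List.pyGet? tags ((idx : Int) - 1) with
        | none => false
        | some prev =>
          if PySem.Set.contains (PySem.Set.ofList ["B-" ++ label, "I-" ++ label]) prev then
            validate_bio_tags_py_go tags (idx + 1) rest
          else false
    else validate_bio_tags_py_go tags (idx + 1) rest

def validate_bio_tags_py (tags : List String) : Bool :=
  validate_bio_tags_py_go tags 0 tags

-- ===== PORT B =====
-- module-level transition table _NEXT of Source B: built from the start/"O" row by the for-loop over the three labels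
def pvBASE : List String := ["O", "B-OBJECT", "B-ATTRIBUTE", "B-RELATION"]

def pvNEXT : PySem.Dict String (PySem.Set String) :=
  (["OBJECT", "ATTRIBUTE", "RELATION"] : List String).foldl
    (fun d l =>
      let allowed := PySem.Set.ofList (pvBASE ++ ["I-" ++ l])
      PySem.Dict.insert (PySem.Dict.insert d ("B-" ++ l) allowed) ("I-" ++ l) allowed)
    (PySem.Dict.insert (PySem.Dict.insert PySem.Dict.empty "^" (PySem.Set.ofList pvBASE))
      "O" (PySem.Set.ofList pvBASE))

-- the DFA run: state is "^" or the previous tag; _NEXT[state] would raise KeyError on a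
-- missing state, but the state is always a key of the table, so the none branch is unreachable
def validate_bio_tags_py_alt_go (state : String) : List String → Bool
  | [] => true
  | tag :: rest =>
    match PySem.Dict.get? pvNEXT state with
    | none => false
    | some allowed =>
      if !(PySem.Set.contains allowed tag) then false
      else validate_bio_tags_py_alt_go tag rest

def validate_bio_tags_py_alt (tags : List String) : Bool :=
  validate_bio_tags_py_alt_go "^" tags

-- ===== PRECONDITION & SPEC =====
def Spec_validate_bio_tags_py (tags : List String) (out : Bool) : Prop := out = validate_bio_tags_py_alt tags
instance (tags : List String) (out : Bool) : Decidable (Spec_validate_bio_tags_py tags out) := by unfold Spec_validate_bio_tags_py; infer_instance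

-- ===== CLAIM (what is proved, stated in full; the proofs are below) =====
def Claim_equal_validate_bio_tags_py : Prop := ∀ (tags : List String), Dom_validate_bio_tags_py tags → Spec_validate_bio_tags_py tags (validate_bio_tags_py tags)

-- ===== LEMMAS AND PROOFS =====

-- the common shape A reduces to: a walk carrying the previous tag
def pvChain (prev : Option String) : List String → Bool
  | [] => true
  | tag :: rest =>
    if !(PySem.Set.contains pvEXPECTED tag) then false
    else if PySem.Str.startswith tag "I-" then
      match prev with
      | none => false
      | some p =>
        if PySem.Set.contains
            (PySem.Set.ofList ["B-" ++ PySem.Str.slice tag (some 2) none,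
                               "I-" ++ PySem.Str.slice tag (some 2) none]) p then
          pvChain (some tag) rest
        else false
    else pvChain (some tag) rest

lemma pvGo_eq_chain : ∀ (rest pre : List String),
    validate_bio_tags_py_go (pre ++ rest) pre.length rest = pvChain pre.getLast? rest := by
  intro rest
  induction rest with
  | nil => intro pre; rfl
  | cons tag rest ih =>
    intro pre
    have hrec : validate_bio_tags_py_go (pre ++ tag :: rest) (pre.length + 1) rest
        = pvChain (some tag) rest := by
      have h1 : pre ++ tag :: rest = (pre ++ [tag]) ++ rest := by simp
      have h2 : pre.length + 1 = (pre ++ [tag]).length := by simp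
      rw [h1, h2, ih (pre ++ [tag])]
      simp
    cases hpre : pre with
    | nil =>
      subst hpre
      simp only [validate_bio_tags_py_go, pvChain, List.nil_append, List.getLast?_nil,
        List.length_nil] at *
      split_ifs <;> simp_all
    | cons q qs =>
      have hne : pre ≠ [] := by simp [hpre]
      have hlen : 1 ≤ pre.length := by rw [hpre]; simp
      have hprev : PySem.List.pyGet? (pre ++ tag :: rest) ((pre.length : Int) - 1)
          = pre.getLast? := by
        have hc : ((pre.length : Int) - 1) = ((pre.length - 1 : Nat) : Int) := by omega
        rw [hc, PySem.List.pyGet?_natCast]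
        rw [List.getElem?_append_left (by omega)]
        rw [List.getLast?_eq_getElem?]
      rw [← hpre] at *
      cases hlast : pre.getLast? with
      | none => exact absurd (List.getLast?_eq_none_iff.mp hlast) hne
      | some p =>
        simp only [validate_bio_tags_py_go, pvChain]
        have hidx : (pre.length == 0) = false := by
          simp [List.length_eq_zero_iff]; exact hne
        rw [hidx, hprev, hlast]
        split_ifs <;> simp_all

-- one chain step, as a Bool
def pvOkStep (prev : Option String) (tag : String) : Bool :=
  if !(PySem.Set.contains pvEXPECTED tag) then false
  else if PySem.Str.startswith tag "I-" then
    match prev with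
    | none => false
    | some p =>
      PySem.Set.contains
        (PySem.Set.ofList ["B-" ++ PySem.Str.slice tag (some 2) none,
                           "I-" ++ PySem.Str.slice tag (some 2) none]) p
  else true

lemma pvChain_cons (prev : Option String) (tag : String) (rest : List String) :
    pvChain prev (tag :: rest) = (pvOkStep prev tag && pvChain (some tag) rest) := by
  simp only [pvChain, pvOkStep]
  split_ifs <;> cases prev <;> simp_all

-- the valid automaton states: start, or one of the seven labels
def pvValidPrev (prev : Option String) : Prop :=
  prev = none ∨ prev = some "O" ∨ prev = some "B-OBJECT" ∨ prev = some "I-OBJECT" ∨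
    prev = some "B-ATTRIBUTE" ∨ prev = some "I-ATTRIBUTE" ∨ prev = some "B-RELATION" ∨
    prev = some "I-RELATION"

def pvStateOf : Option String → String
  | none => "^"
  | some p => p

-- the table rows: each valid state maps to a set drawn from the seven labels
lemma pvGet_subset (prev : Option String) (hp : pvValidPrev prev) :
    ∃ al, PySem.Dict.get? pvNEXT (pvStateOf prev) = some al ∧
      ∀ x ∈ al, x ∈ (["O", "B-OBJECT", "I-OBJECT", "B-ATTRIBUTE", "I-ATTRIBUTE", "B-RELATION",
        "I-RELATION"] : List String) := by
  rcases hp with h | h | h | h | h | h | h | h <;> subst h <;>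
    first
      | exact ⟨PySem.Set.ofList pvBASE, by decide, by decide⟩
      | exact ⟨PySem.Set.ofList (pvBASE ++ ["I-OBJECT"]), by decide, by decide⟩
      | exact ⟨PySem.Set.ofList (pvBASE ++ ["I-ATTRIBUTE"]), by decide, by decide⟩
      | exact ⟨PySem.Set.ofList (pvBASE ++ ["I-RELATION"]), by decide, by decide⟩

-- the table lookup of B agrees with the string-parsing step of A on every valid state
lemma pvStep_eq (prev : Option String) (hp : pvValidPrev prev) (tag : String) :
    (match PySem.Dict.get? pvNEXT (pvStateOf prev) with
     | none => false
     | some allowed => PySem.Set.contains allowed tag) = pvOkStep prev tag := by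
  by_cases htag : tag ∈ (["O", "B-OBJECT", "I-OBJECT", "B-ATTRIBUTE", "I-ATTRIBUTE",
      "B-RELATION", "I-RELATION"] : List String)
  · simp only [List.mem_cons, List.not_mem_nil, or_false] at htag
    rcases hp with h | h | h | h | h | h | h | h <;> subst h <;>
      rcases htag with h | h | h | h | h | h | h <;> subst h <;> decide
  · obtain ⟨al, hg, hsub⟩ := pvGet_subset prev hp
    rw [hg]
    have hal : tag ∉ al := fun hmem => htag (hsub tag hmem)
    have hexp : tag ∉ pvEXPECTED := by
      intro hmem
      exact htag (by simpa [pvEXPECTED, PySem.Set.mem_ofList] using hmem)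
    simp [pvOkStep, PySem.Set.contains, hal, hexp]

-- an accepted tag is one of the seven labels (so a valid next state)
lemma pvOk_valid (prev : Option String) (tag : String) (h : pvOkStep prev tag = true) :
    pvValidPrev (some tag) := by
  have hm : tag ∈ pvEXPECTED := by
    by_contra hc
    simp [pvOkStep] at h
    exact hc h.1
  have hm7 : tag ∈ (["O", "B-OBJECT", "I-OBJECT", "B-ATTRIBUTE", "I-ATTRIBUTE", "B-RELATION",
      "I-RELATION"] : List String) := by
    simpa [pvEXPECTED, PySem.Set.mem_ofList] using hm
  simp only [List.mem_cons, List.not_mem_nil, or_false] at hm7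
  unfold pvValidPrev
  rcases hm7 with h | h | h | h | h | h | h <;> simp [h]

lemma pvRun_eq_chain : ∀ (l : List String) (prev : Option String), pvValidPrev prev →
    validate_bio_tags_py_alt_go (pvStateOf prev) l = pvChain prev l := by
  intro l
  induction l with
  | nil => intro prev _; rfl
  | cons tag rest ih =>
    intro prev hp
    have hs := pvStep_eq prev hp tag
    rw [pvChain_cons]
    simp only [validate_bio_tags_py_alt_go]
    cases hget : PySem.Dict.get? pvNEXT (pvStateOf prev) with
    | none =>
      rw [hget] at hs
      simp only at hs
      simp [← hs]
    | some allowed =>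
      rw [hget] at hs
      simp only at hs
      by_cases hc : tag ∈ allowed
      · have hcc : PySem.Set.contains allowed tag = true := by simp [PySem.Set.contains, hc]
        rw [hcc] at hs
        have hv := pvOk_valid prev tag hs.symm
        have hrec := ih (some tag) hv
        simp only [pvStateOf] at hrec
        simp [PySem.Set.contains, hc, ← hs, hrec]
      · have hcc : PySem.Set.contains allowed tag = false := by simp [PySem.Set.contains, hc]
        rw [hcc] at hs
        simp [PySem.Set.contains, hc, ← hs]

-- ===== VERDICT (by name: the statement is the Claim_ definition above) =====
theorem validate_bio_tags_py_spec : Claim_equal_validate_bio_tags_py := by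
  intro tags _
  show validate_bio_tags_py tags = validate_bio_tags_py_alt tags
  have hA : validate_bio_tags_py tags = pvChain none tags := by
    have := pvGo_eq_chain tags []
    simpa [validate_bio_tags_py] using this
  have hB : validate_bio_tags_py_alt tags = pvChain none tags := by
    have := pvRun_eq_chain tags none (Or.inl rfl)
    simpa [validate_bio_tags_py_alt, pvStateOf] using this
  rw [hA, hB]
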